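-- pv_equiv track=rewrite | github.com/Jacopo21/Startups-Multiples | feature_cleaning.py | map_to_macro_region
-- ===== SOURCE A (Python) =====
-- def map_to_macro_region(region):
--     # North America
--     if any(x in region for x in ['West Coast', 'Western US', 'East Coast', 'Great Lakes', 'Midwestern US', 'Southern US', 'Northeastern US']):
--         return 'North America'
--
--     # Asia-Pacific (APAC)
--     elif any(x in region for x in ['Asia-Pacific', 'APAC', 'Southeast Asia', 'Australasia']):
--         return 'Asia-Pacific'
--
--     # Europe, Middle East, and Africa (EMEA)
--     elif any(x in region for x in ['Europe', 'Middle East', 'Africa', 'EMEA', 'European Union', 'EU', 'Scandinavia', 'Nordic', 'GCC', 'MENA', 'North Africa']):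
--         return 'EMEA'
--
--     # Latin America
--     elif any(x in region for x in ['Latin America', 'Central America']):
--         return 'Latin America'
--
--     # Default to 'Other' if no matches found
--     else:
--         return 'Other'
-- ===== SOURCE B (Python) =====
-- # Single flat pass with a min-priority accumulator, then a label-table lookup:
-- # every keyword carries a numeric priority (0 = North America ... 3 = Latin America);
-- # scan all keywords once, keep the smallest priority that matches, index the label table.
-- _FLAT = [
--     ('West Coast', 0), ('Western US', 0), ('East Coast', 0), ('Great Lakes', 0),
--     ('Midwestern US', 0), ('Southern US', 0), ('Northeastern US', 0),
--     ('Asia-Pacific', 1), ('APAC', 1), ('Southeast Asia', 1), ('Australasia', 1),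
--     ('Europe', 2), ('Middle East', 2), ('Africa', 2), ('EMEA', 2), ('European Union', 2),
--     ('EU', 2), ('Scandinavia', 2), ('Nordic', 2), ('GCC', 2), ('MENA', 2), ('North Africa', 2),
--     ('Latin America', 3), ('Central America', 3),
-- ]
-- _LABELS = ['North America', 'Asia-Pacific', 'EMEA', 'Latin America', 'Other']
--
-- def map_to_macro_region(region):
--     best = 4
--     for kw, rank in _FLAT:
--         if kw in region:
--             best = min(best, rank)
--     return _LABELS[best]
-- ===== Notes on version B (the rewrite author's own statement) =====
-- stated objective: alternative
-- what changed: Replaced the four early-return if/elif branch arms by one exhaustive pass over a flat (keyword, priority) list that keeps the minimum matching priority in an accumulator and finally indexes a label table; no grouping, no early return.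
import Mathlib
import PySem

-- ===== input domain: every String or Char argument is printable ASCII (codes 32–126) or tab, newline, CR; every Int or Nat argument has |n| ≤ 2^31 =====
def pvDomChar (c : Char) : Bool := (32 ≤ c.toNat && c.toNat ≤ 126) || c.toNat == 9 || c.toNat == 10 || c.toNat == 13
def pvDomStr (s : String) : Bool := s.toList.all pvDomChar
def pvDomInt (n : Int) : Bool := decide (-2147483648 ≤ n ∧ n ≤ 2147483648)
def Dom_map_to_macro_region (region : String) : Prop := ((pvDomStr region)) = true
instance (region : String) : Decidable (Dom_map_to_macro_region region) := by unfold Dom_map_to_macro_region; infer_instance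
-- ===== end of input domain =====

-- B replaces A's four early-return if/elif arms by one exhaustive pass over a flat (keyword, priority) list keeping the minimum matching priority, then a label-table lookup (alternative decomposition; same cost).


-- ===== PORT A =====
def map_to_macro_region (region : String) : String :=
  if ["West Coast", "Western US", "East Coast", "Great Lakes", "Midwestern US", "Southern US", "Northeastern US"].any (fun x => PySem.Str.isIn x region) then
    "North America"
  else if ["Asia-Pacific", "APAC", "Southeast Asia", "Australasia"].any (fun x => PySem.Str.isIn x region) then
    "Asia-Pacific"
  else if ["Europe", "Middle East", "Africa", "EMEA", "European Union", "EU", "Scandinavia", "Nordic", "GCC", "MENA", "North Africa"].any (fun x => PySem.Str.isIn x region) then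
    "EMEA"
  else if ["Latin America", "Central America"].any (fun x => PySem.Str.isIn x region) then
    "Latin America"
  else
    "Other"

-- ===== PORT B =====
-- the flat (keyword, priority) list _FLAT of Source B
def flatKeywords : List (String × Nat) :=
  [("West Coast", 0), ("Western US", 0), ("East Coast", 0), ("Great Lakes", 0),
   ("Midwestern US", 0), ("Southern US", 0), ("Northeastern US", 0),
   ("Asia-Pacific", 1), ("APAC", 1), ("Southeast Asia", 1), ("Australasia", 1),
   ("Europe", 2), ("Middle East", 2), ("Africa", 2), ("EMEA", 2), ("European Union", 2),
   ("EU", 2), ("Scandinavia", 2), ("Nordic", 2), ("GCC", 2), ("MENA", 2), ("North Africa", 2),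
   ("Latin America", 3), ("Central America", 3)]

-- the label table _LABELS of Source B
def rankLabels : List String :=
  ["North America", "Asia-Pacific", "EMEA", "Latin America", "Other"]

-- Source B's loop: min-priority accumulator over the flat list, then _LABELS[best]
-- (best is always 0..4, so the Python index never raises; getD's default is unreachable)
def map_to_macro_region_alt (region : String) : String :=
  rankLabels.getD
    (flatKeywords.foldl
      (fun best q => if PySem.Str.isIn q.1 region then min best q.2 else best) 4)
    "Other"

-- ===== PRECONDITION & SPEC =====
def Spec_map_to_macro_region (region : String) (out : String) : Prop := out = map_to_macro_region_alt region
instance (region : String) (out : String) : Decidable (Spec_map_to_macro_region region out) := by unfold Spec_map_to_macro_region; infer_instance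

-- ===== CLAIM =====
def Claim_equal_map_to_macro_region : Prop := ∀ (region : String), Dom_map_to_macro_region region → Spec_map_to_macro_region region (map_to_macro_region region)

-- ===== LEMMAS AND PROOFS =====

-- folding the min-accumulator step over one priority group: the whole group acts
-- like a single 'if any keyword matches then min acc r' update
theorem foldGroup (region : String) (kws : List String) (r acc : Nat) :
    List.foldl (fun best q => if PySem.Str.isIn q.1 region then min best q.2 else best) acc
      (kws.map (fun k => (k, r)))
    = if kws.any (fun x => PySem.Str.isIn x region) then min acc r else acc := by
  induction kws generalizing acc with
  | nil => simp
  | cons k rest ih =>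
      simp only [List.map, List.foldl, List.any_cons, Bool.or_eq_true]
      by_cases h : PySem.Str.isIn k region = true
      · rw [if_pos h, ih]
        by_cases ha : (rest.any fun x => PySem.Str.isIn x region) = true
        · rw [if_pos ha, if_pos (Or.inl h), Nat.min_assoc, Nat.min_self]
        · rw [if_neg ha, if_pos (Or.inl h)]
      · rw [if_neg h, ih]
        by_cases ha : (rest.any fun x => PySem.Str.isIn x region) = true
        · rw [if_pos ha, if_pos (Or.inr ha)]
        · rw [if_neg ha, if_neg (by tauto)]

-- the flat list is the concatenation of the four groups, each tagged with its rank
theorem flat_eq : flatKeywords =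
    (["West Coast", "Western US", "East Coast", "Great Lakes", "Midwestern US", "Southern US", "Northeastern US"].map (fun k => (k, 0)))
    ++ (["Asia-Pacific", "APAC", "Southeast Asia", "Australasia"].map (fun k => (k, 1)))
    ++ (["Europe", "Middle East", "Africa", "EMEA", "European Union", "EU", "Scandinavia", "Nordic", "GCC", "MENA", "North Africa"].map (fun k => (k, 2)))
    ++ (["Latin America", "Central America"].map (fun k => (k, 3))) := by
  rfl

-- ===== VERDICT =====
theorem map_to_macro_region_spec : Claim_equal_map_to_macro_region := by
  intro region _
  unfold Spec_map_to_macro_region map_to_macro_region map_to_macro_region_alt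
  rw [flat_eq]
  simp only [List.foldl_append, foldGroup]
  by_cases h0 : (["West Coast", "Western US", "East Coast", "Great Lakes", "Midwestern US", "Southern US", "Northeastern US"].any (fun x => PySem.Str.isIn x region)) = true <;>
  by_cases h1 : (["Asia-Pacific", "APAC", "Southeast Asia", "Australasia"].any (fun x => PySem.Str.isIn x region)) = true <;>
  by_cases h2 : (["Europe", "Middle East", "Africa", "EMEA", "European Union", "EU", "Scandinavia", "Nordic", "GCC", "MENA", "North Africa"].any (fun x => PySem.Str.isIn x region)) = true <;>
  by_cases h3 : (["Latin America", "Central America"].any (fun x => PySem.Str.isIn x region)) = true <;>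
  simp only [h0, h1, h2, h3, if_true] <;> rfl
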